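-- pv_equiv track=rewrite | github.com/MargaritaSyrtl/TSPD-OSRM | tsp.py | repair_three_trucks_make_middle_drone
-- ===== SOURCE A (Python) =====
-- def repair_three_trucks_make_middle_drone(chrom):
--     """
--     If three consecutive truck nodes (T T T) are encountered,
--     transforms the middle one into a drone node: (T D T).
--     """
--     chrom_list = list(chrom)
--     for i in range(1, len(chrom_list) - 1):
--         if (chrom_list[i - 1][1] == 'truck'
--                 and chrom_list[i][1] == 'truck'
--                 and chrom_list[i + 1][1] == 'truck'):
--             node, _ = chrom_list[i]
--             chrom_list[i] = (node, 'drone')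
--     return tuple(chrom_list)
-- ===== SOURCE B (Python) =====
-- def _convert_run(run):
--     # run is a maximal block of consecutive 'truck' nodes; by the closed-form
--     # rule the nodes converted to 'drone' are exactly those at odd offsets
--     # k = 1, 3, 5, ... with k <= len(run) - 2.
--     L = len(run)
--     return [(node, 'drone') if (k % 2 == 1 and k <= L - 2) else (node, typ)
--             for k, (node, typ) in enumerate(run)]
--
--
-- def repair_three_trucks_make_middle_drone(chrom):
--     out = []
--     run = []
--     for node, typ in chrom:
--         if typ == 'truck':
--             run.append((node, typ))
--         else:
--             out.extend(_convert_run(run))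
--             run = []
--             out.append((node, typ))
--     out.extend(_convert_run(run))
--     return tuple(out)
-- ===== Notes on version B (the rewrite author's own statement) =====
-- stated objective: alternative
-- what changed: A does one greedy left-to-right pass mutating a copy in place and re-reading the just-mutated left neighbour; B is staged: it splits the list into maximal runs of consecutive 'truck' nodes and rewrites each run by a closed-form parity rule (convert offsets 1,3,5,... up to len-2), with no neighbour checks.
import Mathlib
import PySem

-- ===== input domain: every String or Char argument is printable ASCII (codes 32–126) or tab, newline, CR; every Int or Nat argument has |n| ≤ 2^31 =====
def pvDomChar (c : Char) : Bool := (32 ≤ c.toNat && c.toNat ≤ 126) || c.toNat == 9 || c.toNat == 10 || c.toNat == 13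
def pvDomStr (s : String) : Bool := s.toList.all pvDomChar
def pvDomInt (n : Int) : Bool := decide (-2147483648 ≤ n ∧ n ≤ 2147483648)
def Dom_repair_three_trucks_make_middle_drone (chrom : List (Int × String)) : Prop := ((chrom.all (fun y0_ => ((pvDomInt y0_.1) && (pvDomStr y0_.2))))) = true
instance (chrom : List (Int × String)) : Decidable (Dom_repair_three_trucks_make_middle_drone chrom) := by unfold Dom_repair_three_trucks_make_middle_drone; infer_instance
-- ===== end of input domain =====

-- B replaces A's greedy in-place indexed loop (which re-reads the just-mutated left neighbour)
-- by a staged algorithm: split into maximal 'truck' runs, rewrite each run by the closed-form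
-- parity rule (convert offsets 1,3,5,… up to len-2) — same cost, different algorithm.
-- A mutates only its local copy, so return-value equivalence is the whole story.

-- ===== PORT A =====
-- A's loop body. The indices i, i-1, i+1 are always in range (the loop runs i = 1 .. len-2),
-- so the total pyGetD/pySetD forms are exact here: the Python raises nowhere.
def pvStepA (l : List (Int × String)) (i : Int) : List (Int × String) :=
  if ((PySem.List.pyGetD l (i - 1) (0, "")).2 == "truck"
      && (PySem.List.pyGetD l i (0, "")).2 == "truck"
      && (PySem.List.pyGetD l (i + 1) (0, "")).2 == "truck") then
    let node := (PySem.List.pyGetD l i (0, "")).1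
    PySem.List.pySetD l i (node, "drone")
  else l

def repair_three_trucks_make_middle_drone (chrom : List (Int × String)) : List (Int × String) :=
  let chromList := chrom
  (PySem.List.pyRange 1 ((chromList.length : Int) - 1) 1).foldl pvStepA chromList

-- ===== PORT B =====
-- Source B's _convert_run: the enumerate comprehension, with the index k carried along.
-- Python's test 'k <= L - 2' over ints is written 'k + 2 ≤ L' (equivalent since k, L : ℕ here).
def pvConvertAux (L : Nat) (k : Nat) : List (Int × String) → List (Int × String)
  | [] => []
  | x :: rest =>
    (if k % 2 == 1 && k + 2 ≤ L then (x.1, "drone") else x) :: pvConvertAux L (k + 1) rest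

def pvConvertRun (run : List (Int × String)) : List (Int × String) :=
  pvConvertAux run.length 0 run

-- Source B's main loop: accumulate the current truck run; flush it through _convert_run at each
-- non-truck node and at the end.
def pvGoRuns : List (Int × String) → List (Int × String) → List (Int × String)
  | run, [] => pvConvertRun run
  | run, x :: rest =>
    if x.2 == "truck" then pvGoRuns (run ++ [x]) rest
    else pvConvertRun run ++ x :: pvGoRuns [] rest

def repair_three_trucks_make_middle_drone_alt (chrom : List (Int × String)) : List (Int × String) :=
  pvGoRuns [] chrom

-- ===== PRECONDITION & SPEC =====
def Spec_repair_three_trucks_make_middle_drone (chrom : List (Int × String)) (out : List (Int × String)) : Prop := out = repair_three_trucks_make_middle_drone_alt chrom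
instance (chrom : List (Int × String)) (out : List (Int × String)) : Decidable (Spec_repair_three_trucks_make_middle_drone chrom out) := by unfold Spec_repair_three_trucks_make_middle_drone; infer_instance

-- ===== CLAIM (what is proved, stated in full; the proofs are below) =====
def Claim_equal_repair_three_trucks_make_middle_drone : Prop := ∀ (chrom : List (Int × String)), Dom_repair_three_trucks_make_middle_drone chrom → Spec_repair_three_trucks_make_middle_drone chrom (repair_three_trucks_make_middle_drone chrom)

-- ===== LEMMAS AND PROOFS =====

-- Proof-only intermediate: a one-pass description of the common behaviour, carrying the flag
-- "the previous output node is a truck". A is proved equal to it by a fold invariant, and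
-- B by a run decomposition.
def pvGoB : Bool → List (Int × String) → List (Int × String)
  | _, [] => []
  | prev, x :: rest =>
    let nxtTruck : Bool := match rest with | [] => false | y :: _ => y.2 == "truck"
    if prev && (x.2 == "truck") && nxtTruck then
      (x.1, "drone") :: pvGoB false rest
    else
      x :: pvGoB (x.2 == "truck") rest

-- One step of A's loop at index pre.length+1 on a list shaped pre ++ [p] ++ x :: y :: l2:
-- it reads p (the already-final left neighbour), x and y, and rewrites x in place.
theorem pvStepA_at (pre : List (Int × String)) (p x y : Int × String) (l2 : List (Int × String)) :
    pvStepA ((pre ++ [p]) ++ x :: y :: l2) ((pre.length : Int) + 1) =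
      (pre ++ [p]) ++ (if (p.2 == "truck") && (x.2 == "truck") && (y.2 == "truck")
                       then (x.1, "drone") else x) :: y :: l2 := by
  simp only [pvStepA]
  have e1 : ((pre.length:Int) + 1 - 1) = ((pre.length : Nat) : Int) := by ring
  have e3 : ((pre.length:Int) + 1 + 1) = (((pre.length + 2 : Nat)) : Int) := by push_cast; ring
  have e2 : ((pre.length:Int) + 1) = (((pre.length + 1 : Nat)) : Int) := by push_cast; ring
  rw [e1, e3, e2]
  rw [PySem.List.pyGetD_natCast, PySem.List.pyGetD_natCast, PySem.List.pyGetD_natCast,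
      PySem.List.pySetD_natCast]
  rcases x with ⟨xn, xt⟩
  simp [List.set_cons_succ, List.append_assoc]
  split_ifs <;> simp

-- Invariant of A's loop: once the prefix pre ++ [p] is final, folding A's step over the
-- remaining indices turns the suffix xs into exactly pvGoB's output with flag "p is a truck".
theorem pvKey : ∀ (xs pre : List (Int × String)) (p : Int × String),
    (PySem.List.pyRange ((pre.length : Int) + 1) ((pre.length : Int) + 1 + (xs.length : Int) - 1) 1).foldl
        pvStepA ((pre ++ [p]) ++ xs)
    = (pre ++ [p]) ++ pvGoB (p.2 == "truck") xs := by
  intro xs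
  induction xs with
  | nil =>
    intro pre p
    rw [PySem.List.pyRange_one_eq_nil (by simp)]
    simp [pvGoB]
  | cons x rest ih =>
    intro pre p
    cases rest with
    | nil =>
      rw [PySem.List.pyRange_one_eq_nil (by simp)]
      simp [pvGoB]
    | cons y l2 =>
      rw [PySem.List.pyRange_one_cons (by simp; omega), List.foldl_cons, pvStepA_at]
      have hnx : pvGoB (p.2 == "truck") (x :: y :: l2) =
          if (p.2 == "truck") && (x.2 == "truck") && (y.2 == "truck")
          then (x.1, "drone") :: pvGoB false (y :: l2)
          else x :: pvGoB (x.2 == "truck") (y :: l2) := rfl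
      rw [hnx]
      have hb1 : (((pre ++ [p]).length : Int) + 1) = (pre.length : Int) + 1 + 1 := by
        simp
      have hb2 : (((pre ++ [p]).length : Int) + 1 + ((y :: l2).length : Int) - 1)
          = (pre.length : Int) + 1 + ((x :: y :: l2).length : Int) - 1 := by
        simp; ring
      by_cases hc : ((p.2 == "truck") && (x.2 == "truck") && (y.2 == "truck")) = true
      · rw [if_pos hc, if_pos hc]
        have h := ih (pre ++ [p]) (x.1, "drone")
        rw [hb2, hb1] at h
        simpa [List.append_assoc, show (("drone" : String) == "truck") = false from by decide] using h
      · rw [if_neg hc, if_neg hc]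
        have h := ih (pre ++ [p]) x
        rw [hb2, hb1] at h
        simpa [List.append_assoc] using h

-- A equals the one-pass description.
theorem pvA_eq_goB (chrom : List (Int × String)) :
    repair_three_trucks_make_middle_drone chrom = pvGoB false chrom := by
  cases chrom with
  | nil =>
    simp [repair_three_trucks_make_middle_drone, pvGoB, PySem.List.pyRange_one_eq_nil]
  | cons a t =>
    have h := pvKey t [] a
    simp only [List.nil_append, List.length_nil, Nat.cast_zero, zero_add] at h
    have hb : ((1 : Int) + (t.length : Int) - 1) = ((a :: t).length : Int) - 1 := by simp
    rw [hb] at h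
    simp only [repair_three_trucks_make_middle_drone]
    rw [show ([a] ++ t : List (Int × String)) = a :: t from rfl] at h
    rw [h]
    have : pvGoB false (a :: t) = a :: pvGoB (a.2 == "truck") t := by simp [pvGoB]
    rw [this]
    simp

-- Shifting the enumeration by 2 (both the index and the total length) changes nothing.
theorem pvConvertAux_shift : ∀ (ts : List (Int × String)) (m k : Nat),
    pvConvertAux (m + 2) (k + 2) ts = pvConvertAux m k ts := by
  intro ts
  induction ts with
  | nil => intro m k; rfl
  | cons x rest ih =>
    intro m k
    simp only [pvConvertAux, ih]
    by_cases hle : k + 2 ≤ m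
    · simp [hle, show k + 2 + 2 ≤ m + 2 from by omega, Nat.add_mod_right]
    · simp [hle, show ¬(k + 2 + 2 ≤ m + 2) from by omega, Nat.add_mod_right]

-- The three unfolding equations of _convert_run used by the run decomposition.
theorem pvConvertRun_single (t : Int × String) : pvConvertRun [t] = [t] := by
  simp [pvConvertRun, pvConvertAux]

theorem pvConvertRun_pair (t1 t2 : Int × String) : pvConvertRun [t1, t2] = [t1, t2] := by
  simp [pvConvertRun, pvConvertAux]

theorem pvConvertRun_step (t1 t2 t3 : Int × String) (ts : List (Int × String)) :
    pvConvertRun (t1 :: t2 :: t3 :: ts) = t1 :: (t2.1, "drone") :: pvConvertRun (t3 :: ts) := by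
  simp only [pvConvertRun, List.length_cons, pvConvertAux]
  have hsh := pvConvertAux_shift ts (ts.length + 1) 1
  simp only [show ts.length + 1 + 1 + 1 = ts.length + 1 + 2 from by ring,
    show (0:Nat) + 1 + 1 + 1 = 1 + 2 from rfl] at *
  rw [hsh]
  have h4 : (1 + 2 ≤ ts.length + 1 + 2) := by omega
  simp [h4]

-- A non-truck head makes pvGoB ignore the incoming flag.
theorem pvGoB_nontruck (b : Bool) (x : Int × String) (rest : List (Int × String))
    (hx : (x.2 == "truck") = false) : pvGoB b (x :: rest) = x :: pvGoB false rest := by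
  simp [pvGoB, hx]

-- Run decomposition of pvGoB: on a maximal truck run ts followed by ys (empty or starting
-- with a non-truck node), pvGoB rewrites ts exactly as _convert_run does.
theorem pvRunGen : ∀ (n : Nat) (ts ys : List (Int × String)), ts.length = n →
    (∀ t ∈ ts, (t.2 == "truck") = true) →
    (∀ x rest, ys = x :: rest → (x.2 == "truck") = false) →
    pvGoB false (ts ++ ys) = pvConvertRun ts ++ pvGoB false ys := by
  intro n
  induction n using Nat.strong_induction_on with
  | _ n ih =>
    intro ts ys hlen hts hys
    match ts with
    | [] => simp [pvConvertRun, pvConvertAux]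
    | [t] =>
      have ht : (t.2 == "truck") = true := hts t (by simp)
      rw [pvConvertRun_single]
      cases ys with
      | nil => simp [pvGoB, ht]
      | cons x rest =>
        have hx := hys x rest rfl
        simp only [List.cons_append, List.nil_append]
        rw [show pvGoB false (t :: x :: rest)
              = t :: pvGoB (t.2 == "truck") (x :: rest) from by
            simp [pvGoB, show (x.2 == "truck") = false from hx]]
        rw [ht, pvGoB_nontruck _ _ _ hx, pvGoB_nontruck _ _ _ hx]
    | t1 :: t2 :: ts' =>
      have ht1 : (t1.2 == "truck") = true := hts t1 (by simp)
      have ht2 : (t2.2 == "truck") = true := hts t2 (by simp)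
      cases ts' with
      | nil =>
        rw [pvConvertRun_pair]
        cases ys with
        | nil => simp [pvGoB, ht1, ht2]
        | cons x rest =>
          have hx := hys x rest rfl
          simp only [List.cons_append, List.nil_append]
          rw [show pvGoB false (t1 :: t2 :: x :: rest)
                = t1 :: pvGoB (t1.2 == "truck") (t2 :: x :: rest) from by
              simp [pvGoB]]
          rw [ht1]
          rw [show pvGoB true (t2 :: x :: rest)
                = t2 :: pvGoB (t2.2 == "truck") (x :: rest) from by
              simp [pvGoB, ht2, show (x.2 == "truck") = false from hx]]
          rw [ht2, pvGoB_nontruck _ _ _ hx, pvGoB_nontruck _ _ _ hx]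
      | cons t3 ts'' =>
        have ht3 : (t3.2 == "truck") = true := hts t3 (by simp)
        rw [pvConvertRun_step]
        have hlt : (t3 :: ts'').length < n := by rw [← hlen]; simp
        have hrec := ih ((t3 :: ts'').length) hlt (t3 :: ts'') ys rfl
          (fun t ht => hts t (by simp at ht ⊢; tauto)) hys
        simp only [List.cons_append] at hrec ⊢
        rw [show pvGoB false (t1 :: t2 :: t3 :: (ts'' ++ ys))
              = t1 :: pvGoB (t1.2 == "truck") (t2 :: t3 :: (ts'' ++ ys)) from by
            simp [pvGoB]]
        rw [ht1]
        rw [show pvGoB true (t2 :: t3 :: (ts'' ++ ys))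
              = (t2.1, "drone") :: pvGoB false (t3 :: (ts'' ++ ys)) from by
            simp [pvGoB, ht2, ht3]]
        rw [hrec]

-- B's accumulator loop, related to pvGoB: while run holds only trucks,
-- pvGoRuns run xs = pvGoB false (run ++ xs).
theorem pvMain : ∀ (xs run : List (Int × String)),
    (∀ t ∈ run, (t.2 == "truck") = true) →
    pvGoRuns run xs = pvGoB false (run ++ xs) := by
  intro xs
  induction xs with
  | nil =>
    intro run hrun
    rw [show pvGoRuns run [] = pvConvertRun run from rfl]
    rw [pvRunGen run.length run [] rfl hrun (by intro x rest h; cases h)]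
    simp [pvGoB]
  | cons x rest ih =>
    intro run hrun
    by_cases hx : (x.2 == "truck") = true
    · rw [show pvGoRuns run (x :: rest) = pvGoRuns (run ++ [x]) rest from by
        simp [pvGoRuns, hx]]
      have hrun' : ∀ t ∈ run ++ [x], (t.2 == "truck") = true := by
        intro t ht
        simp only [List.mem_append, List.mem_singleton] at ht
        rcases ht with h | h
        · exact hrun t h
        · subst h; exact hx
      rw [ih (run ++ [x]) hrun']
      simp [List.append_assoc]
    · have hx' : (x.2 == "truck") = false := by simpa using hx
      rw [show pvGoRuns run (x :: rest) = pvConvertRun run ++ x :: pvGoRuns [] rest from by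
        simp [pvGoRuns, hx']]
      rw [ih [] (by simp)]
      simp only [List.nil_append]
      rw [pvRunGen run.length run (x :: rest) rfl hrun
        (by intro y r h; cases h; exact hx')]
      rw [pvGoB_nontruck _ _ _ hx']

-- ===== VERDICT (by name: the statement is the Claim_ definition above) =====
theorem repair_three_trucks_make_middle_drone_spec : Claim_equal_repair_three_trucks_make_middle_drone := by
  intro chrom _
  show repair_three_trucks_make_middle_drone chrom = repair_three_trucks_make_middle_drone_alt chrom
  rw [pvA_eq_goB]
  rw [show repair_three_trucks_make_middle_drone_alt chrom = pvGoRuns [] chrom from rfl]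
  rw [pvMain chrom [] (by simp)]
  rfl
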